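-- pv_equiv track=rewrite | github.com/QSOLKCB/QEC | src/qec/analysis/experiment_strategy.py | compute_boundary_cells
-- ===== SOURCE A (Python) =====
-- from typing import Any, Dict, FrozenSet, List, Optional, Set, Tuple
--
-- def _manhattan_neighbors(
--     cell_key: Tuple[int, ...], bins: int,
-- ) -> List[Tuple[int, ...]]:
--     """Return Manhattan-adjacent cells within grid bounds."""
--     neighbors = []
--     for dim in range(len(cell_key)):
--         for delta in (-1, 1):
--             new_idx = cell_key[dim] + delta
--             if 0 <= new_idx < bins:
--                 neighbor = list(cell_key)
--                 neighbor[dim] = new_idx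
--                 neighbors.append(tuple(neighbor))
--     return neighbors
--
-- def compute_boundary_cells(
--     state_grid: Dict[Tuple[int, ...], str],
--     bins: int,
-- ) -> Dict[Tuple[int, ...], bool]:
--     """Identify cells where any Manhattan neighbor has a different state."""
--     result: Dict[Tuple[int, ...], bool] = {}
--     for key in sorted(state_grid.keys()):
--         my_state = state_grid[key]
--         is_boundary = False
--         for nb in _manhattan_neighbors(key, bins):
--             if nb in state_grid and state_grid[nb] != my_state:
--                 is_boundary = True
--                 break
--         result[key] = is_boundary
--     return result
-- ===== SOURCE B (Python) =====
-- from typing import Dict, Tuple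
--
--
-- def compute_boundary_cells(
--     state_grid: Dict[Tuple[int, ...], str],
--     bins: int,
-- ) -> Dict[Tuple[int, ...], bool]:
--     """Scatter pass: seed every cell as non-boundary, then let each cell whose
--     coordinate along an axis lies within the grid bounds mark its
--     differently-stated axis-neighbors as boundary cells."""
--     result = {key: False for key in sorted(state_grid)}
--     lookup = state_grid.get
--     for cell, state in state_grid.items():
--         for dim, idx in enumerate(cell):
--             if 0 <= idx < bins:
--                 head, tail = cell[:dim], cell[dim + 1:]
--                 for neighbor in (head + (idx - 1,) + tail,
--                                  head + (idx + 1,) + tail):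
--                     if lookup(neighbor, state) != state:
--                         result[neighbor] = True
--     return result
-- ===== Notes on version B (the rewrite author's own statement) =====
-- stated objective: alternative
-- what changed: Replaces A's per-cell gather over all 2d Manhattan neighbors with an early break by a scatter pass: every cell is seeded False in sorted order, then each cell whose coordinate along an axis lies in [0, bins) marks its differently-stated axis-neighbors (found via dict.get) as boundary, so no neighbor list is ever built and no break is needed.
import Mathlib
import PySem

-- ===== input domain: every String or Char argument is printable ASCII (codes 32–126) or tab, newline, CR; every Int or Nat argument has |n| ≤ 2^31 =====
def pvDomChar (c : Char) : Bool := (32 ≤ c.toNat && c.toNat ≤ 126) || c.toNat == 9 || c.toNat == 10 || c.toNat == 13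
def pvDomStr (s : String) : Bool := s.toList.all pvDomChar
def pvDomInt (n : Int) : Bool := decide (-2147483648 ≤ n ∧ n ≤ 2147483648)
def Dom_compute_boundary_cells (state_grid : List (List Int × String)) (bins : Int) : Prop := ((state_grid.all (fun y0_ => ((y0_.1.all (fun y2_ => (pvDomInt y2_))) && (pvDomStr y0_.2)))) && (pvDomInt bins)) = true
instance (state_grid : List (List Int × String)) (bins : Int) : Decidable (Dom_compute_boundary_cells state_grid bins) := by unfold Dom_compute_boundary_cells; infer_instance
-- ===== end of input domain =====

-- B replaces A's per-cell gather over Manhattan neighbors by a scatter pass that seeds every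
-- cell False and lets each in-bounds cell mark its differently-stated axis-neighbors (alternative decomposition, same cost).


-- ===== PORT A =====
def manhattan_neighbors (cell_key : List Int) (bins : Int) : List (List Int) :=
  (PySem.List.pyRange 0 (cell_key.length : Int) 1).foldl (fun neighbors dim =>
    [(-1 : Int), 1].foldl (fun neighbors delta =>
      let new_idx := PySem.List.pyGetD cell_key dim 0 + delta
      if 0 ≤ new_idx ∧ new_idx < bins then
        neighbors ++ [PySem.List.pySetD cell_key dim new_idx]
      else neighbors) neighbors) []

def compute_boundary_cells (state_grid : List (List Int × String)) (bins : Int) : List (List Int × Bool) :=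
  let d := PySem.Dict.ofList state_grid
  ((PySem.List.sorted d.keys (fun k => k) false).foldl (fun result key =>
    let my_state := d.getD key ""
    let is_boundary := (manhattan_neighbors key bins).foldl (fun b nb =>
      b || (d.contains nb && decide (d.getD nb "" ≠ my_state))) false
    result.insert key is_boundary) PySem.Dict.empty).items

-- ===== PORT B =====
-- B-side helper: body of the innermost 'for neighbor in (…)' loop of Source B
def markNb (d : PySem.Dict (List Int) String) (state : String)
    (result : PySem.Dict (List Int) Bool) (nb : List Int) : PySem.Dict (List Int) Bool :=
  if d.getD nb state ≠ state then result.insert nb true else result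

-- B-side helper: body of the 'for dim, idx in enumerate(cell)' loop of Source B
def markEdge (d : PySem.Dict (List Int) String) (bins : Int) (cell : List Int) (state : String)
    (result : PySem.Dict (List Int) Bool) (di : Int × Int) : PySem.Dict (List Int) Bool :=
  if 0 ≤ di.2 ∧ di.2 < bins then
    let head := PySem.List.slice cell none (some di.1)
    let tail := PySem.List.slice cell (some (di.1 + 1)) none
    [head ++ [di.2 - 1] ++ tail, head ++ [di.2 + 1] ++ tail].foldl (markNb d state) result
  else result

-- B-side helper: body of the outer 'for cell, state in state_grid.items()' loop of Source B
def markCell (d : PySem.Dict (List Int) String) (bins : Int)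
    (result : PySem.Dict (List Int) Bool) (p : List Int × String) : PySem.Dict (List Int) Bool :=
  (PySem.List.enumerate p.1 0).foldl (markEdge d bins p.1 p.2) result

def compute_boundary_cells_alt (state_grid : List (List Int × String)) (bins : Int) : List (List Int × Bool) :=
  let d := PySem.Dict.ofList state_grid
  let seeded := (PySem.List.sorted d.keys (fun k => k) false).foldl
      (fun result key => result.insert key false) PySem.Dict.empty
  (d.items.foldl (markCell d bins) seeded).items

-- ===== PRECONDITION & SPEC =====
def Spec_compute_boundary_cells (state_grid : List (List Int × String)) (bins : Int) (out : List (List Int × Bool)) : Prop := out = compute_boundary_cells_alt state_grid bins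
instance (state_grid : List (List Int × String)) (bins : Int) (out : List (List Int × Bool)) : Decidable (Spec_compute_boundary_cells state_grid bins out) := by unfold Spec_compute_boundary_cells; infer_instance

-- ===== CLAIM (what is proved, stated in full; the proofs are below) =====
def Claim_equal_compute_boundary_cells : Prop := ∀ (state_grid : List (List Int × String)) (bins : Int), Dom_compute_boundary_cells state_grid bins → Spec_compute_boundary_cells state_grid bins (compute_boundary_cells state_grid bins)

-- ===== LEMMAS AND PROOFS =====

def bdy (bins x : Int) : Bool := decide (0 ≤ x ∧ x < bins)

-- 'the processing of cell c (state st) at dimension i marks cell k' (B's edge predicate)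
def edgeB (d : PySem.Dict (List Int) String) (bins : Int) (c : List Int) (st : String)
    (i : Int) (k : List Int) : Bool :=
  bdy bins (PySem.List.pyGetD c i 0) &&
  ((decide (k = PySem.List.pySetD c i (PySem.List.pyGetD c i 0 - 1)) ||
    decide (k = PySem.List.pySetD c i (PySem.List.pyGetD c i 0 + 1))) &&
   decide (d.getD k st ≠ st))

-- 'k is marked by some cell of the grid' (B's final value at k)
def incB (d : PySem.Dict (List Int) String) (bins : Int) (k : List Int) : Bool :=
  d.items.any (fun p => (PySem.List.pyRange 0 (p.1.length : Int) 1).any (fun i => edgeB d bins p.1 p.2 i k))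

-- A's per-neighbor test and per-cell flag, as 'any'
def condA (d : PySem.Dict (List Int) String) (my : String) (nb : List Int) : Bool :=
  d.contains nb && decide (d.getD nb "" ≠ my)

def boundA (d : PySem.Dict (List Int) String) (bins : Int) (key : List Int) : Bool :=
  (manhattan_neighbors key bins).any (condA d (d.getD key ""))

lemma nb_slice_eq (c : List Int) (i : Int) (v : Int) (h0 : 0 ≤ i) (h1 : i < (c.length : Int)) :
    PySem.List.slice c none (some i) ++ [v]
      ++ PySem.List.slice c (some (i + 1)) none = c.set i.toNat v := by
  rw [PySem.List.slice_to c h0, PySem.List.slice_from c (by omega)]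
  have ht : (i + 1).toNat = i.toNat + 1 := by omega
  rw [ht, List.set_eq_take_append_cons_drop]
  have : i.toNat < c.length := by omega
  simp [this]

lemma markNb_getD (d : PySem.Dict (List Int) String) (st : String)
    (r : PySem.Dict (List Int) Bool) (nb k : List Int) :
    (markNb d st r nb).getD k false =
      (r.getD k false || (decide (k = nb) && decide (d.getD nb st ≠ st))) := by
  unfold markNb
  split_ifs with h <;> by_cases hk : k = nb <;>
    simp_all [PySem.Dict.getD_insert]

lemma markNb_keys (d : PySem.Dict (List Int) String) (st : String)
    (r : PySem.Dict (List Int) Bool) (nb : List Int)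
    (hd : ∀ x, x ∈ d.keys → x ∈ r.keys) :
    (markNb d st r nb).keys = r.keys := by
  unfold markNb
  split_ifs with h
  · have hc : d.contains nb = true := by
      by_contra hc
      exact h (PySem.Dict.getD_of_not_contains d st (by simpa using hc))
    exact PySem.Dict.keys_insert_of_contains _ _
      ((PySem.Dict.contains_iff_mem_keys ..).mpr (hd nb ((PySem.Dict.contains_iff_mem_keys ..).mp hc)))
  · rfl

lemma markEdge_getD (d : PySem.Dict (List Int) String) (bins : Int) (c : List Int) (st : String)
    (r : PySem.Dict (List Int) Bool) (i : Int) (h0 : 0 ≤ i) (h1 : i < (c.length : Int)) (k : List Int) :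
    (markEdge d bins c st r (i, PySem.List.pyGetD c i 0)).getD k false =
      (r.getD k false || edgeB d bins c st i k) := by
  simp only [markEdge]
  split_ifs with hb
  · simp only [List.foldl_cons, List.foldl_nil]
    rw [markNb_getD, markNb_getD,
      nb_slice_eq c i (PySem.List.pyGetD c i 0 - 1) h0 h1,
      nb_slice_eq c i (PySem.List.pyGetD c i 0 + 1) h0 h1]
    unfold edgeB bdy
    rw [PySem.List.pySetD_of_nonneg c _ h0, PySem.List.pySetD_of_nonneg c _ h0]
    by_cases hm : k = c.set i.toNat (PySem.List.pyGetD c i 0 - 1) <;>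
      by_cases hp : k = c.set i.toNat (PySem.List.pyGetD c i 0 + 1) <;>
      simp_all
  · unfold edgeB bdy
    simp [hb]

lemma markEdge_keys (d : PySem.Dict (List Int) String) (bins : Int) (c : List Int) (st : String)
    (r : PySem.Dict (List Int) Bool) (di : Int × Int)
    (hd : ∀ x, x ∈ d.keys → x ∈ r.keys) :
    (markEdge d bins c st r di).keys = r.keys := by
  unfold markEdge
  split_ifs with hb
  · simp only [List.foldl_cons, List.foldl_nil]
    rw [markNb_keys d st _ _ (fun x hx => by
        rw [markNb_keys d st r _ hd]; exact hd x hx),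
      markNb_keys d st r _ hd]
  · rfl

lemma foldl_markEdge (d : PySem.Dict (List Int) String) (bins : Int) (c : List Int) (st : String)
    (l : List Int) (hl : ∀ i ∈ l, 0 ≤ i ∧ i < (c.length : Int))
    (r : PySem.Dict (List Int) Bool) (hd : ∀ x, x ∈ d.keys → x ∈ r.keys) :
    ((l.map (fun j => (j, PySem.List.pyGetD c j 0))).foldl (markEdge d bins c st) r).keys = r.keys ∧
    ∀ k, ((l.map (fun j => (j, PySem.List.pyGetD c j 0))).foldl (markEdge d bins c st) r).getD k false =
      (r.getD k false || l.any (fun i => edgeB d bins c st i k)) := by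
  induction l generalizing r with
  | nil => simp
  | cons i t ih =>
    have hi := hl i (by simp)
    have hk := markEdge_keys d bins c st r (i, PySem.List.pyGetD c i 0) hd
    have iht := ih (fun j hj => hl j (by simp [hj]))
      (markEdge d bins c st r (i, PySem.List.pyGetD c i 0)) (fun x hx => hk ▸ hd x hx)
    refine ⟨by simpa [hk] using iht.1, fun k => ?_⟩
    simp only [List.map_cons, List.foldl_cons, iht.2 k,
      markEdge_getD d bins c st r i hi.1 hi.2 k, List.any_cons, Bool.or_assoc]

lemma foldl_markCell (d : PySem.Dict (List Int) String) (bins : Int)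
    (l : List (List Int × String)) (hl : ∀ p ∈ l, p.1 ∈ d.keys)
    (r : PySem.Dict (List Int) Bool) (hd : ∀ x, x ∈ d.keys → x ∈ r.keys) :
    (l.foldl (markCell d bins) r).keys = r.keys ∧
    ∀ k, (l.foldl (markCell d bins) r).getD k false =
      (r.getD k false || l.any (fun p => (PySem.List.pyRange 0 (p.1.length : Int) 1).any
        (fun i => edgeB d bins p.1 p.2 i k))) := by
  induction l generalizing r with
  | nil => simp
  | cons p t ih =>
    have henum : PySem.List.enumerate p.1 0
        = (PySem.List.pyRange 0 (p.1.length : Int) 1).map (fun j => (j, PySem.List.pyGetD p.1 j 0)) :=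
      PySem.List.enumerate_eq_map_pyRange p.1 0
    have hstep := foldl_markEdge d bins p.1 p.2 (PySem.List.pyRange 0 (p.1.length : Int) 1)
      (fun i hi => by simpa using (PySem.List.mem_pyRange_one).mp hi) r hd
    have hmc : markCell d bins r p
        = ((PySem.List.pyRange 0 (p.1.length : Int) 1).map (fun j => (j, PySem.List.pyGetD p.1 j 0))).foldl
            (markEdge d bins p.1 p.2) r := by
      unfold markCell; rw [henum]
    have hk : (markCell d bins r p).keys = r.keys := by rw [hmc]; exact hstep.1
    have iht := ih (fun q hq => hl q (by simp [hq]))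
      (markCell d bins r p) (fun x hx => hk ▸ hd x hx)
    refine ⟨by simpa [hk] using iht.1, fun k => ?_⟩
    have h2 := hstep.2 k
    rw [← hmc] at h2
    simp only [List.foldl_cons, List.any_cons]
    rw [iht.2 k, h2, Bool.or_assoc]

lemma mem_manhattan (k : List Int) (bins : Int) (nb : List Int) :
    nb ∈ manhattan_neighbors k bins ↔ ∃ i : Int, (0 ≤ i ∧ i < (k.length : Int)) ∧ ∃ δ : Int,
      (δ = -1 ∨ δ = 1) ∧ (0 ≤ PySem.List.pyGetD k i 0 + δ ∧ PySem.List.pyGetD k i 0 + δ < bins) ∧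
      nb = PySem.List.pySetD k i (PySem.List.pyGetD k i 0 + δ) := by
  unfold manhattan_neighbors
  rw [show (fun (neighbors : List (List Int)) (dim : Int) =>
      [(-1 : Int), 1].foldl (fun neighbors delta =>
        let new_idx := PySem.List.pyGetD k dim 0 + delta
        if 0 ≤ new_idx ∧ new_idx < bins then
          neighbors ++ [PySem.List.pySetD k dim new_idx]
        else neighbors) neighbors)
    = (fun acc i => acc ++
        ((if 0 ≤ PySem.List.pyGetD k i 0 + (-1) ∧ PySem.List.pyGetD k i 0 + (-1) < bins then
            [PySem.List.pySetD k i (PySem.List.pyGetD k i 0 + (-1))] else []) ++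
         (if 0 ≤ PySem.List.pyGetD k i 0 + 1 ∧ PySem.List.pyGetD k i 0 + 1 < bins then
            [PySem.List.pySetD k i (PySem.List.pyGetD k i 0 + 1)] else []))) from by
      funext acc i
      simp only [List.foldl]
      split_ifs <;> simp]
  rw [PySem.List.foldl_append_eq_flatMap]
  simp only [List.nil_append, List.mem_flatMap, PySem.List.mem_pyRange_one, List.mem_append]
  constructor
  · rintro ⟨i, hi, hmem⟩
    rcases hmem with hm | hm <;>
    · rw [List.mem_ite_nil_right] at hm
      exact ⟨i, hi, _, by simp, hm.1, by simpa using hm.2⟩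
  · rintro ⟨i, hi, δ, hδ, hbd, hnb⟩
    refine ⟨i, hi, ?_⟩
    rcases hδ with h | h <;> subst h
    · exact Or.inl (by rw [List.mem_ite_nil_right]; exact ⟨hbd, by simpa using hnb⟩)
    · exact Or.inr (by rw [List.mem_ite_nil_right]; exact ⟨hbd, by simpa using hnb⟩)

lemma bound_eq_inc (d : PySem.Dict (List Int) String) (bins : Int) (hnd : d.keys.Nodup)
    (k : List Int) (hk : k ∈ d.keys) : boundA d bins k = incB d bins k := by
  have hmem : ∀ {c : List Int}, c ∈ d.keys → (c, d.getD c "") ∈ d.items := by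
    intro c hc
    simp only [PySem.Dict.keys] at hc
    rcases List.mem_map.mp hc with ⟨p, hp, hpe⟩
    cases p with | mk c' v =>
      cases hpe
      rw [PySem.Dict.getD_of_mem_items d hp hnd]
      exact hp
  have hgetD : ∀ {c : List Int} (st : String), c ∈ d.keys → d.getD c st = d.getD c "" := by
    intro c st hc
    rw [PySem.Dict.getD_of_mem_items d (hmem hc) hnd st]
  rw [Bool.eq_iff_iff]
  simp only [boundA, incB, List.any_eq_true, mem_manhattan]
  constructor
  · rintro ⟨nb, ⟨i, ⟨hi0, hi1⟩, δ, hδ, ⟨hb0, hb1⟩, rfl⟩, hcond⟩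
    simp only [condA, Bool.and_eq_true, decide_eq_true_eq] at hcond
    obtain ⟨hctn, hne⟩ := hcond
    have hitn : i.toNat < k.length := by omega
    have hgk : PySem.List.pyGetD k i 0 = k[i.toNat] := PySem.List.pyGetD_eq_getElem k 0 hi0 hi1
    have hset : PySem.List.pySetD k i (PySem.List.pyGetD k i 0 + δ) = k.set i.toNat (k[i.toNat] + δ) := by
      rw [PySem.List.pySetD_of_nonneg k _ hi0, hgk]
    set n := k.set i.toNat (k[i.toNat] + δ) with hn
    rw [hset] at hctn hne
    have hnk : n ∈ d.keys := (PySem.Dict.contains_iff_mem_keys ..).mp hctn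
    have hnlen : (n.length : Int) = (k.length : Int) := by rw [hn]; simp
    have hgn : PySem.List.pyGetD n i 0 = k[i.toNat] + δ := by
      rw [PySem.List.pyGetD_eq_getElem n 0 hi0 (by omega)]
      simp [hn]
    rw [hgk] at hb0 hb1
    refine ⟨(n, d.getD n ""), hmem hnk,
      i, PySem.List.mem_pyRange_one.mpr ⟨hi0, by rw [hnlen]; exact hi1⟩, ?_⟩
    have hback : ∀ w : Int, n.set i.toNat w = k.set i.toNat w := by
      intro w; rw [hn, List.set_set]
    simp only [edgeB, bdy, Bool.and_eq_true, Bool.or_eq_true, decide_eq_true_eq]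
    refine ⟨by rw [hgn]; omega, ?_, ?_⟩
    · rcases hδ with rfl | rfl
      · -- δ = -1 : k = n.set i (n[i]+1)
        refine Or.inr ?_
        rw [PySem.List.pySetD_of_nonneg n _ hi0, hgn, hback]
        have : k[i.toNat] + -1 + 1 = k[i.toNat] := by omega
        rw [this, List.set_getElem_self]
      · -- δ = 1 : k = n.set i (n[i]-1)
        refine Or.inl ?_
        rw [PySem.List.pySetD_of_nonneg n _ hi0, hgn, hback]
        have : k[i.toNat] + 1 - 1 = k[i.toNat] := by omega
        rw [this, List.set_getElem_self]
    · rw [hgetD _ hk]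
      exact fun hc => hne (hc.symm)
  · rintro ⟨⟨q, st⟩, hpmem, i, hirange, hedge⟩
    obtain ⟨hi0, hi1'⟩ := PySem.List.mem_pyRange_one.mp hirange
    have hi1 : i < (q.length : Int) := by simpa using hi1'
    have hitn : i.toNat < q.length := by omega
    have hst : st = d.getD q "" := (PySem.Dict.getD_of_mem_items d hpmem hnd "").symm
    have hck : q ∈ d.keys := PySem.Dict.mem_keys_of_mem_items d hpmem
    have hgc : PySem.List.pyGetD q i 0 = q[i.toNat] := PySem.List.pyGetD_eq_getElem q 0 hi0 hi1
    simp only [edgeB, bdy, Bool.and_eq_true, Bool.or_eq_true, decide_eq_true_eq] at hedge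
    obtain ⟨hb, hside, hne⟩ := hedge
    rw [hgc] at hb
    have hctk : d.contains k = true := by
      by_contra hc
      exact hne (PySem.Dict.getD_of_not_contains d st (by simpa using hc))
    have hkk : k ∈ d.keys := (PySem.Dict.contains_iff_mem_keys ..).mp hctk
    have hnekk : d.getD k "" ≠ d.getD q "" := by
      rw [← hgetD st hkk, ← hst]
      exact hne
    rcases hside with hkc | hkc <;>
      rw [PySem.List.pySetD_of_nonneg q _ hi0, hgc] at hkc
    · -- k = q.set i (q[i]-1) : q is k's +1 neighbor, with new index q[i] ∈ [0,bins)
      have hklen : (k.length : Int) = (q.length : Int) := by rw [hkc]; simp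
      have hgk : PySem.List.pyGetD k i 0 = q[i.toNat] - 1 := by
        rw [PySem.List.pyGetD_eq_getElem k 0 hi0 (by omega)]
        simp [hkc]
      refine ⟨q, ⟨i, ⟨hi0, by rw [hklen]; exact hi1⟩, 1, Or.inr rfl, ?_, ?_⟩, ?_⟩
      · rw [hgk]; constructor <;> omega
      · rw [PySem.List.pySetD_of_nonneg k _ hi0, hgk, hkc, List.set_set]
        have : q[i.toNat] - 1 + 1 = q[i.toNat] := by omega
        rw [this, List.set_getElem_self]
      · simp only [condA, Bool.and_eq_true, decide_eq_true_eq]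
        exact ⟨(PySem.Dict.contains_iff_mem_keys ..).mpr hck, fun hc => hnekk hc.symm ⟩
    · -- k = q.set i (q[i]+1) : q is k's -1 neighbor, with new index q[i] ∈ [0,bins)
      have hklen : (k.length : Int) = (q.length : Int) := by rw [hkc]; simp
      have hgk : PySem.List.pyGetD k i 0 = q[i.toNat] + 1 := by
        rw [PySem.List.pyGetD_eq_getElem k 0 hi0 (by omega)]
        simp [hkc]
      refine ⟨q, ⟨i, ⟨hi0, by rw [hklen]; exact hi1⟩, -1, Or.inl rfl, ?_, ?_⟩, ?_⟩
      · rw [hgk]; constructor <;> omega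
      · rw [PySem.List.pySetD_of_nonneg k _ hi0, hgk, hkc, List.set_set]
        have : q[i.toNat] + 1 + -1 = q[i.toNat] := by omega
        rw [this, List.set_getElem_self]
      · simp only [condA, Bool.and_eq_true, decide_eq_true_eq]
        exact ⟨(PySem.Dict.contains_iff_mem_keys ..).mpr hck, fun hc => hnekk hc.symm⟩

lemma foldl_or_any {α : Type} (l : List α) (p : α → Bool) (b : Bool) :
    l.foldl (fun b x => b || p x) b = (b || l.any p) := by
  induction l generalizing b with
  | nil => simp
  | cons x xs ih => simp [List.foldl, ih, Bool.or_assoc]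

lemma main_eq (sg : List (List Int × String)) (bins : Int) :
    compute_boundary_cells sg bins = compute_boundary_cells_alt sg bins := by
  unfold compute_boundary_cells compute_boundary_cells_alt
  simp only []
  set d := PySem.Dict.ofList sg with hdd
  set ks := PySem.List.sorted d.keys (fun k => k) false with hksd
  have hndk : d.keys.Nodup := PySem.Dict.nodup_keys_ofList sg
  have hks : ks.Nodup := ((PySem.List.sorted_perm d.keys (fun k => k) false).nodup_iff).mpr hndk
  have hmemks : ∀ {x}, x ∈ ks ↔ x ∈ d.keys := fun {x} => PySem.List.mem_sorted ..
  -- A side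
  have hA := PySem.Dict.items_foldl_insert_fresh (ν := Bool) ks (fun a => a)
    (fun key => (manhattan_neighbors key bins).foldl (fun b nb =>
      b || (d.contains nb && decide (d.getD nb "" ≠ d.getD key ""))) false)
    PySem.Dict.empty (fun a _ => by simp) (by simpa using hks)
  rw [hA]
  -- B side: seeded
  have hS := PySem.Dict.items_foldl_insert_fresh (ν := Bool) ks (fun a => a)
    (fun _ => false) PySem.Dict.empty (fun a _ => by simp) (by simpa using hks)
  have hSkeys : ((ks.foldl (fun result key => result.insert key false) PySem.Dict.empty)).keys = ks := by
    simp only [PySem.Dict.keys]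
    rw [hS]
    simp [PySem.Dict.empty]
    rw [show ((fun x : List Int × Bool => x.1) ∘ fun a : List Int => (a, false)) = id from rfl,
      List.map_id]
  have hSgetD : ∀ k, ((ks.foldl (fun result key => result.insert key false) PySem.Dict.empty)).getD k false = false := by
    intro k
    by_cases hk : k ∈ ks
    · refine PySem.Dict.getD_of_mem_items _ ?_ (by rw [hSkeys]; exact hks) false
      rw [hS]
      simp only [List.mem_append, List.mem_map]
      exact Or.inr ⟨k, hk, rfl⟩
    · refine PySem.Dict.getD_of_not_contains _ _ ?_
      rw [← Bool.not_eq_true, PySem.Dict.contains_iff_mem_keys, hSkeys]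
      exact hk
  -- B side: marking fold
  have hF := foldl_markCell d bins d.items (fun p hp => PySem.Dict.mem_keys_of_mem_items d hp)
    (ks.foldl (fun result key => result.insert key false) PySem.Dict.empty)
    (fun x hx => by rw [hSkeys]; exact hmemks.mpr hx)
  have hFkeys : (d.items.foldl (markCell d bins)
      (ks.foldl (fun result key => result.insert key false) PySem.Dict.empty)).keys = ks := by
    rw [hF.1, hSkeys]
  have hFitems := PySem.Dict.items_eq_map_keys
    (d.items.foldl (markCell d bins) (ks.foldl (fun result key => result.insert key false) PySem.Dict.empty))
    (by rw [hFkeys]; exact hks) false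
  rw [hFitems, hFkeys]
  apply List.map_congr_left
  intro k hkks
  have h2 := hF.2 k
  rw [hSgetD k, Bool.false_or] at h2
  rw [h2]
  congr 1
  simp only [foldl_or_any, Bool.false_or]
  exact bound_eq_inc d bins hndk k (hmemks.mp hkks)

-- ===== VERDICT (by name: the statement is the Claim_ definition above) =====
theorem compute_boundary_cells_spec : Claim_equal_compute_boundary_cells := by
  intro state_grid bins _
  exact main_eq state_grid bins
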